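-- pv_equiv track=rewrite | github.com/jcval94/InsideForest | pyctogram.py | posiciones_valores_frecuentes
-- ===== SOURCE A (Python) =====
-- from collections import Counter
--
-- def posiciones_valores_frecuentes(lista):
--   frecuentes = Counter(lista).most_common()
--   if len(set(lista)) == len(lista):
--     resultado = list(range(len(lista)))
--   else:
--     frecuencia_maxima = frecuentes[0][1]
--     resultado = [i for i, v in enumerate(lista) if v in dict(frecuentes).keys() and
--            dict(frecuentes)[v] == frecuencia_maxima]
--   return resultado
-- ===== SOURCE B (Python) =====
-- def posiciones_valores_frecuentes(lista):
--   pairs = [(v, i) for i, v in enumerate(lista)]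
--   groups = {}
--   for v, i in pairs:
--     groups.setdefault(v, []).append(i)
--   if not groups:
--     return []
--   max_len = max(map(len, groups.values()))
--   resultado = [i for ps in groups.values() if len(ps) == max_len for i in ps]
--   return sorted(resultado)
-- ===== Notes on version B (the rewrite author's own statement) =====
-- stated objective: faster
-- what changed: B groups indices by value in a single dict pass and flattens the maximal-length groups (then sorts the indices), instead of Counter + most_common sort + a distinctness special case + rebuilding dict(frecuentes) from scratch inside the per-element filter condition.
import Mathlib
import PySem

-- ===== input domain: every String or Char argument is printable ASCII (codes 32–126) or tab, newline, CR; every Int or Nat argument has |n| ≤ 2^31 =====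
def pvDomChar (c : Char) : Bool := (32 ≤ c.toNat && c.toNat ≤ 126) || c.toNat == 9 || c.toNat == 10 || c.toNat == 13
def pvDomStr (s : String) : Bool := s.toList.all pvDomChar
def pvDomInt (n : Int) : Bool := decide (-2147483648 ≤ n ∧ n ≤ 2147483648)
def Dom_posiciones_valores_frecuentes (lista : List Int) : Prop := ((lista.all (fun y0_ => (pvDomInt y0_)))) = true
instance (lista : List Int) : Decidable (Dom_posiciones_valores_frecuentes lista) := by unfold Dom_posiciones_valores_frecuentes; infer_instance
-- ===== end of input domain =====

-- B groups indices by value in one dict pass and collects the maximal groups, instead of Counter + most_common sort + per-element dict(frecuentes) rebuilds; same return value, measurably faster (A rebuilds the dict for every element).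

-- ===== PORT A =====
def posiciones_valores_frecuentes (lista : List Int) : List Int :=
  -- frecuentes = Counter(lista).most_common()  (sorted by count, descending, stable)
  let frecuentes := PySem.List.sorted (PySem.Dict.counter lista).items (fun p => p.2) true
  if PySem.Set.len (PySem.Set.ofList lista) == lista.length then
    PySem.List.pyRange 0 lista.length 1
  else
    match PySem.List.pyGet? frecuentes 0 with
    | none => []  -- unreachable: Python would raise IndexError (this branch needs lista ≠ [])
    | some p0 =>
      let fmax := p0.2
      -- [i for i, v in enumerate(lista) if v in dict(frecuentes).keys() and dict(frecuentes)[v] == fmax]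
      ((PySem.List.enumerate lista 0).filter (fun iv =>
          (PySem.Dict.ofList frecuentes).contains iv.2 &&
          ((PySem.Dict.ofList frecuentes).get? iv.2).getD 0 == fmax)).map (·.1)

-- ===== PORT B =====
def posiciones_valores_frecuentes_alt (lista : List Int) : List Int :=
  let pairs := (PySem.List.enumerate lista 0).map (fun iv => (iv.2, iv.1))
  let groups := pairs.foldl (fun d p => d.modify p.1 [] (· ++ [p.2])) PySem.Dict.empty
  if groups.items = [] then []
  else
    match PySem.List.max? (groups.values.map List.length) (fun x => x) with
    | none => []  -- unreachable: groups is nonempty here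
    | some maxLen =>
      let resultado := (groups.values.filter (fun ps => ps.length == maxLen)).flatMap id
      PySem.List.sorted resultado (fun x => x) false

-- ===== PRECONDITION & SPEC =====
def Spec_posiciones_valores_frecuentes (lista : List Int) (out : List Int) : Prop := out = posiciones_valores_frecuentes_alt lista
instance (lista : List Int) (out : List Int) : Decidable (Spec_posiciones_valores_frecuentes lista out) := by unfold Spec_posiciones_valores_frecuentes; infer_instance

-- ===== CLAIM (what is proved, stated in full; the proofs are below) =====
def Claim_equal_posiciones_valores_frecuentes : Prop := ∀ (lista : List Int), Dom_posiciones_valores_frecuentes lista → Spec_posiciones_valores_frecuentes lista (posiciones_valores_frecuentes lista)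

-- ===== LEMMAS AND PROOFS =====

-- indices of lista (as produced by enumerate) whose value is k
def pvIdx (lista : List Int) (k : Int) : List Int :=
  ((PySem.List.enumerate lista 0).filter (fun p => p.2 == k)).map (·.1)

-- the canonical answer: indices whose value has multiplicity m, in enumerate order
def pvC (lista : List Int) (m : Nat) : List Int :=
  ((PySem.List.enumerate lista 0).filter (fun p => lista.count p.2 == m)).map (·.1)

-- m is THE maximal multiplicity of lista
def pvMaxChar (lista : List Int) (m : Nat) : Prop :=
  (∃ v ∈ lista, lista.count v = m) ∧ (∀ v ∈ lista, lista.count v ≤ m)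

theorem pvMaxChar_unique {lista : List Int} {m m' : Nat}
    (h : pvMaxChar lista m) (h' : pvMaxChar lista m') : m = m' := by
  obtain ⟨⟨v, hv, hc⟩, hle⟩ := h
  obtain ⟨⟨v', hv', hc'⟩, hle'⟩ := h'
  have := hle' v hv
  have := hle v' hv'
  omega

theorem pvEnum_fst_inj {lista : List Int} {p q : Int × Int}
    (hp : p ∈ PySem.List.enumerate lista 0) (hq : q ∈ PySem.List.enumerate lista 0)
    (h : p.1 = q.1) : p = q := by
  rw [PySem.List.mem_enumerate_iff] at hp hq
  obtain ⟨k, hk, rfl⟩ := hp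
  obtain ⟨k', hk', rfl⟩ := hq
  simp only [zero_add] at h
  have : k = k' := by exact_mod_cast h
  subst this; rfl

theorem pvC_pairwise (lista : List Int) (m : Nat) : (pvC lista m).Pairwise (· < ·) := by
  unfold pvC
  exact (List.Pairwise.filter _ (PySem.List.pairwise_lt_enumerate lista 0)).map _ (fun _ _ h => h)

theorem pvIdx_pairwise (lista : List Int) (k : Int) : (pvIdx lista k).Pairwise (· < ·) := by
  unfold pvIdx
  exact (List.Pairwise.filter _ (PySem.List.pairwise_lt_enumerate lista 0)).map _ (fun _ _ h => h)

theorem mem_pvC {lista : List Int} {m : Nat} {x : Int} :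
    x ∈ pvC lista m ↔ ∃ p ∈ PySem.List.enumerate lista 0, p.1 = x ∧ lista.count p.2 = m := by
  simp only [pvC, List.mem_map, List.mem_filter, beq_iff_eq]
  constructor
  · rintro ⟨p, ⟨hp, hc⟩, rfl⟩; exact ⟨p, hp, rfl, hc⟩
  · rintro ⟨p, hp, rfl, hc⟩; exact ⟨p, ⟨hp, hc⟩, rfl⟩

theorem mem_pvIdx {lista : List Int} {k x : Int} :
    x ∈ pvIdx lista k ↔ ∃ p ∈ PySem.List.enumerate lista 0, p.1 = x ∧ p.2 = k := by
  simp only [pvIdx, List.mem_map, List.mem_filter, beq_iff_eq]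
  constructor
  · rintro ⟨p, ⟨hp, hc⟩, rfl⟩; exact ⟨p, hp, rfl, hc⟩
  · rintro ⟨p, hp, rfl, hc⟩; exact ⟨p, ⟨hp, hc⟩, rfl⟩

theorem pvIdx_disjoint {lista : List Int} {a b : Int} (hab : a ≠ b) :
    ∀ x ∈ pvIdx lista a, x ∉ pvIdx lista b := by
  intro x hxa hxb
  rw [mem_pvIdx] at hxa hxb
  obtain ⟨p, hp, hp1, hp2⟩ := hxa
  obtain ⟨q, hq, hq1, hq2⟩ := hxb
  have := pvEnum_fst_inj hp hq (hp1.trans hq1.symm)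
  subst this
  exact hab (hp2 ▸ hq2 ▸ rfl)

theorem pvIdx_length (lista : List Int) (k : Int) : (pvIdx lista k).length = lista.count k := by
  rw [pvIdx, List.length_map, ← List.countP_eq_length_filter, List.count]
  conv_rhs => rw [← PySem.List.map_snd_enumerate lista 0]
  rw [List.countP_map]
  rfl

theorem pvSnd_mem {lista : List Int} {p : Int × Int}
    (hp : p ∈ PySem.List.enumerate lista 0) : p.2 ∈ lista := by
  have := List.mem_map_of_mem (f := (·.2)) hp
  rwa [PySem.List.map_snd_enumerate] at this

-- Nodup ↔ len(set(lista)) == len(lista)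
theorem pvNodup_iff (lista : List Int) :
    (PySem.Set.len (PySem.Set.ofList lista) == lista.length) = true ↔ lista.Nodup := by
  rw [beq_iff_eq, PySem.Set.len]
  constructor
  · intro h
    have h' : (PySem.Set.ofList lista).length = lista.length := by exact_mod_cast h
    have hperm : (PySem.Set.ofList lista).Perm lista.dedup := by
      refine (List.perm_ext_iff_of_nodup (PySem.Set.nodup_ofList lista) lista.nodup_dedup).mpr ?_
      intro x; rw [PySem.Set.mem_ofList, List.mem_dedup]
    have hlen : lista.dedup.length = lista.length := hperm.length_eq ▸ h'
    have := (List.dedup_sublist lista).eq_of_length hlen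
    rw [← List.dedup_eq_self]; exact this
  · intro h
    rw [PySem.Set.ofList_eq_self_of_nodup lista h]

-- B equals the canonical list, given the characterised maximum
theorem pvB_eq_pvC {lista : List Int} {m : Nat} (hne : lista ≠ []) (hm : pvMaxChar lista m) :
    posiciones_valores_frecuentes_alt lista = pvC lista m := by
  unfold posiciones_valores_frecuentes_alt
  simp only
  set pairs := (PySem.List.enumerate lista 0).map (fun iv => (iv.2, iv.1)) with hpairs
  set groups := pairs.foldl (fun d p => d.modify p.1 [] (· ++ [p.2])) PySem.Dict.empty with hgroups
  have hkeys : groups.keys = PySem.Set.ofList lista := by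
    have h1 := PySem.Dict.keys_foldl_modify_key pairs Prod.fst ([] : List Int)
        (fun _ p l => l ++ [p.2]) PySem.Dict.empty
    have h2 : pairs.map Prod.fst = lista := by
      rw [hpairs, List.map_map]
      exact PySem.List.map_snd_enumerate lista 0
    rw [hgroups]
    calc (pairs.foldl (fun d p => d.modify p.1 [] (· ++ [p.2])) PySem.Dict.empty).keys
        = PySem.Set.update PySem.Dict.empty.keys (pairs.map Prod.fst) := h1
      _ = PySem.Set.ofList lista := by
          rw [h2, PySem.Dict.keys_empty, PySem.Set.update_nil_left]
  have hknd : groups.keys.Nodup := by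
    rw [hkeys]; exact PySem.Set.nodup_ofList lista
  have hgetD : ∀ k, groups.getD k [] = pvIdx lista k := by
    intro k
    rw [hgroups]
    have h1 := PySem.Dict.getD_foldl_modify_append pairs PySem.Dict.empty k
    rw [h1, PySem.Dict.getD_empty, List.nil_append, hpairs, List.filter_map, List.map_map]
    rfl
  have hvals : groups.values = groups.keys.map (pvIdx lista) := by
    rw [PySem.Dict.values_eq_map_keys groups hknd []]
    exact List.map_congr_left (fun k _ => hgetD k)
  have hkne : groups.keys ≠ [] := by
    obtain ⟨x, hx⟩ := List.exists_mem_of_ne_nil lista hne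
    intro h0
    have := (PySem.Set.mem_ofList lista x).mpr hx
    rw [← hkeys, h0] at this
    exact absurd this (List.not_mem_nil)
  have hine : ¬ (groups.items = []) := by
    intro h0
    apply hkne
    show groups.items.map (·.1) = []
    rw [h0]; rfl
  rw [if_neg hine]
  have hlens : groups.values.map List.length = groups.keys.map (fun k => lista.count k) := by
    rw [hvals, List.map_map]
    exact List.map_congr_left (fun k _ => pvIdx_length lista k)
  -- the maximum exists
  rcases hmax : PySem.List.max? (groups.values.map List.length) (fun x => x) with _ | maxLen
  · rw [PySem.List.max?_eq_none_iff] at hmax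
    rw [hlens] at hmax
    exact absurd (List.map_eq_nil_iff.mp hmax) hkne
  · -- maxLen is the characterised maximum, so maxLen = m
    have hmemML := PySem.List.max?_mem hmax
    rw [hlens] at hmemML
    obtain ⟨k1, hk1, hk1c⟩ := List.mem_map.mp hmemML
    have hk1l : k1 ∈ lista := by
      rw [hkeys, PySem.Set.mem_ofList] at hk1
      exact hk1
    have hML : pvMaxChar lista maxLen := by
      refine ⟨⟨k1, hk1l, hk1c⟩, ?_⟩
      intro v hv
      have hvm : lista.count v ∈ groups.values.map List.length := by
        rw [hlens]
        exact List.mem_map_of_mem (by rw [hkeys, PySem.Set.mem_ofList]; exact hv)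
      exact PySem.List.max?_isMax hmax _ hvm
    have hmeq : m = maxLen := pvMaxChar_unique hm hML
    subst hmeq
    show PySem.List.sorted ((groups.values.filter (fun ps => ps.length == m)).flatMap id)
        (fun x => x) false = pvC lista m
    -- flatten = flatMap over the keys with maximal multiplicity
    have hflat : (groups.values.filter (fun ps => ps.length == m)).flatMap id
        = (groups.keys.filter (fun k => lista.count k == m)).flatMap (pvIdx lista) := by
      rw [hvals, List.filter_map]
      have : (fun ps => ps.length == m) ∘ pvIdx lista = fun k => lista.count k == m := by
        funext k
        simp [Function.comp, pvIdx_length]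
      rw [this, List.flatMap_map]
      rfl
    rw [hflat]
    -- sorted(flat) = pvC
    apply PySem.List.sorted_eq_of_perm_of_pairwise_lt
    · -- pvC is a permutation of the flattened groups
      apply (List.perm_ext_iff_of_nodup ((pvC_pairwise lista m).imp ne_of_lt) ?_).mpr
      · intro x
        rw [mem_pvC]
        simp only [List.mem_flatMap, List.mem_filter, beq_iff_eq]
        constructor
        · rintro ⟨p, hp, rfl, hc⟩
          refine ⟨p.2, ⟨?_, hc⟩, mem_pvIdx.mpr ⟨p, hp, rfl, rfl⟩⟩
          rw [hkeys, PySem.Set.mem_ofList]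
          exact pvSnd_mem hp
        · rintro ⟨k, ⟨hk, hc⟩, hx⟩
          obtain ⟨p, hp, hp1, hp2⟩ := mem_pvIdx.mp hx
          exact ⟨p, hp, hp1, by rw [hp2]; exact hc⟩
      · -- the flattened groups are Nodup
        rw [List.nodup_flatMap]
        constructor
        · exact fun k _ => (pvIdx_pairwise lista k).imp ne_of_lt
        · have hkf : (groups.keys.filter (fun k => lista.count k == m)).Nodup :=
            hknd.filter _
          exact hkf.imp_of_mem (fun {a b} ha hb hab => pvIdx_disjoint hab)
    · exact pvC_pairwise lista m

-- looking up v in dict(frecuentes): any hit comes from the pair list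
theorem pvGet?_foldl_insert {l : List (Int × Int)} {d : PySem.Dict Int Int} {v w : Int}
    (h : (l.foldl (fun d p => d.insert p.1 p.2) d).get? v = some w) :
    (v, w) ∈ l ∨ d.get? v = some w := by
  induction l generalizing d with
  | nil => exact Or.inr h
  | cons p t ih =>
    rcases ih h with hm | hd
    · exact Or.inl (List.mem_cons_of_mem _ hm)
    · rw [PySem.Dict.get?_insert] at hd
      by_cases hv : v = p.1
      · subst hv
        rw [if_pos rfl] at hd
        injection hd with hd
        exact Or.inl (by rw [← hd]; exact List.mem_cons_self)
      · rw [if_neg hv] at hd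
        exact Or.inr hd

theorem pvDict_get {lista : List Int} {frec : List (Int × Int)}
    (hmem : ∀ p ∈ frec, p.2 = (lista.count p.1 : Int)) {v : Int} (hv : v ∈ frec.map (·.1)) :
    (PySem.Dict.ofList frec).get? v = some ((lista.count v : Int)) := by
  have hkeys : (PySem.Dict.ofList frec).keys = PySem.Set.ofList (frec.map (·.1)) := by
    have := PySem.Dict.keys_foldl_insert_key frec Prod.fst (fun _ p => p.2)
        (PySem.Dict.empty : PySem.Dict Int Int)
    simpa [PySem.Set.update_nil_left] using this
  have hcont : (PySem.Dict.ofList frec).contains v = true := by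
    rw [PySem.Dict.contains_iff_mem_keys, hkeys, PySem.Set.mem_ofList]
    exact hv
  rw [PySem.Dict.contains_eq_isSome_get?] at hcont
  obtain ⟨w, hw⟩ := Option.isSome_iff_exists.mp hcont
  have := pvGet?_foldl_insert (d := PySem.Dict.empty) (l := frec) (v := v) (w := w) hw
  rcases this with hm | hempty
  · rw [hw]; exact congrArg some (hmem (v, w) hm)
  · simp [PySem.Dict.get?_empty] at hempty

-- A's non-unique branch equals the canonical list
theorem pvA_eq_pvC {lista : List Int} (hnd : ¬ lista.Nodup) :
    ∃ m, pvMaxChar lista m ∧ posiciones_valores_frecuentes lista = pvC lista m := by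
  have hne : lista ≠ [] := by rintro rfl; exact hnd List.nodup_nil
  set frec := PySem.List.sorted (PySem.Dict.counter lista).items (fun p => p.2) true with hfrecdef
  have hitems : (PySem.Dict.counter lista).items
      = (PySem.Set.ofList lista).map (fun k => (k, (lista.count k : Int))) :=
    PySem.Dict.items_counter lista
  have hperm : frec.Perm ((PySem.Set.ofList lista).map (fun k => (k, (lista.count k : Int)))) := by
    rw [← hitems]; exact PySem.List.sorted_perm _ _ _
  have hS : ∀ v ∈ lista, v ∈ PySem.Set.ofList lista := fun v hv => (PySem.Set.mem_ofList lista v).mpr hv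
  have hfmem : ∀ p ∈ frec, p.2 = (lista.count p.1 : Int) := by
    intro p hp
    have := hperm.mem_iff.mp hp
    obtain ⟨k, hk, rfl⟩ := List.mem_map.mp this
    rfl
  have hfne : frec ≠ [] := by
    intro h0
    rw [hfrecdef, PySem.List.sorted_eq_nil_iff, hitems, List.map_eq_nil_iff] at h0
    obtain ⟨x, hx⟩ := List.exists_mem_of_ne_nil lista hne
    have := hS x hx
    rw [h0] at this
    exact absurd this (List.not_mem_nil)
  obtain ⟨p0, t, hcons⟩ := List.exists_cons_of_ne_nil hfne
  have hp0 : p0 ∈ frec := by rw [hcons]; exact List.mem_cons_self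
  obtain ⟨k0, hk0, hp0eq⟩ := List.mem_map.mp (hperm.mem_iff.mp hp0)
  have hk0l : k0 ∈ lista := (PySem.Set.mem_ofList lista k0).mp hk0
  refine ⟨lista.count k0, ⟨⟨k0, hk0l, rfl⟩, ?_⟩, ?_⟩
  · -- maximality
    intro v hv
    have hy : (v, (lista.count v : Int)) ∈ (PySem.Dict.counter lista).items := by
      rw [hitems]; exact List.mem_map_of_mem (hS v hv)
    have h1 := PySem.List.key_head_sorted_rev_ge (PySem.Dict.counter lista).items
        (fun p => p.2) (hfrecdef ▸ hcons) _ hy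
    have h2 : ((lista.count v : Int)) ≤ ((lista.count k0 : Int)) := by
      rw [← hp0eq] at h1
      simpa using h1
    exact_mod_cast h2
  · -- the branch computes pvC
    unfold posiciones_valores_frecuentes
    rw [if_neg]
    · rw [← hfrecdef, hcons]
      have hget0 : PySem.List.pyGet? (p0 :: t) (0 : Int) = some p0 := by
        simp [PySem.List.pyGet?, PySem.List.pyIdx?]
      rw [hget0]
      simp only
      rw [← hcons, pvC]
      congr 1
      apply List.filter_congr
      intro p hp
      have hpl : p.2 ∈ lista := pvSnd_mem hp
      have hpmap : p.2 ∈ frec.map (·.1) := by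
        have : p.2 ∈ ((PySem.Set.ofList lista).map (fun k => (k, (lista.count k : Int)))).map (·.1) := by
          simp only [List.map_map]
          exact List.mem_map_of_mem (hS p.2 hpl)
        exact ((hperm.map (·.1)).mem_iff).mpr this
      have hget := pvDict_get hfmem hpmap
      have hcont : (PySem.Dict.ofList frec).contains p.2 = true := by
        rw [PySem.Dict.contains_eq_isSome_get?, hget]; rfl
      rw [hcont, hget, ← hp0eq]
      simp only [Bool.true_and, Option.getD_some]
      show (((lista.count p.2 : Int)) == ((lista.count k0 : Int))) = (lista.count p.2 == lista.count k0)
      simp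
    · intro hc
      exact hnd ((pvNodup_iff lista).mp (by simpa using hc))

theorem pvC_all_one {lista : List Int} (hnd : lista.Nodup) :
    pvC lista 1 = PySem.List.pyRange 0 lista.length 1 := by
  have hf : (PySem.List.enumerate lista 0).filter (fun p => lista.count p.2 == 1)
      = PySem.List.enumerate lista 0 := by
    apply List.filter_eq_self.mpr
    intro p hp
    simp [List.count_eq_one_of_mem hnd (pvSnd_mem hp)]
  rw [pvC, hf]
  have := PySem.List.map_fst_enumerate lista 0
  simpa using this

-- ===== VERDICT (by name: the statement is the Claim_ definition above) =====
theorem posiciones_valores_frecuentes_spec : Claim_equal_posiciones_valores_frecuentes := by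
  intro lista _
  unfold Spec_posiciones_valores_frecuentes
  by_cases hd : lista.Nodup
  · rcases eq_or_ne lista [] with rfl | hne
    · rfl
    · have hA : posiciones_valores_frecuentes lista = PySem.List.pyRange 0 lista.length 1 := by
        unfold posiciones_valores_frecuentes
        rw [if_pos ((pvNodup_iff lista).mpr hd)]
      obtain ⟨x, hx⟩ := List.exists_mem_of_ne_nil lista hne
      have hchar : pvMaxChar lista 1 := by
        refine ⟨⟨x, hx, List.count_eq_one_of_mem hd hx⟩, ?_⟩
        intro v hv
        exact le_of_eq (List.count_eq_one_of_mem hd hv)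
      rw [hA, pvB_eq_pvC hne hchar, pvC_all_one hd]
  · obtain ⟨m, hchar, hA⟩ := pvA_eq_pvC hd
    have hne : lista ≠ [] := by rintro rfl; exact hd List.nodup_nil
    rw [hA, pvB_eq_pvC hne hchar]
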